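-- pv_equiv track=rewrite | github.com/soobeenpark/scratchwork | programmers.co.kr/greedy/3.py | getNextInd
-- ===== SOURCE A (Python) =====
-- def getNextInd(name, ind):
--     '''Return next index to process in name'''
--     left = 1
--     right = 1
--     while name[(ind+right)%len(name)] == 'A':
--         right += 1
--     while name[(ind-left)%len(name)] == 'A':
--         left += 1
--
--     if left < right:
--         return (ind-left)%len(name)
--     else:
--         return (ind+right)%len(name)
-- ===== SOURCE B (Python) =====
-- def getNextInd(name, ind):
--     '''Return next index to process in name'''
--     n = len(name)
--     pos = [i for i, c in enumerate(name) if c != 'A']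
--     right = min((p - ind - 1) % n + 1 for p in pos)
--     left = min((ind - p - 1) % n + 1 for p in pos)
--     if left < right:
--         return (ind - left) % n
--     else:
--         return (ind + right) % n
-- ===== Notes on version B (the rewrite author's own statement) =====
-- stated objective: alternative
-- what changed: Instead of A's two directional while-scans over characters, B makes one pass collecting the indices of all non-'A' characters, computes each direction's nearest distance as a closed-form modular minimum over that index list, and compares the two minima; no character is ever probed by walking.
import Mathlib
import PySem

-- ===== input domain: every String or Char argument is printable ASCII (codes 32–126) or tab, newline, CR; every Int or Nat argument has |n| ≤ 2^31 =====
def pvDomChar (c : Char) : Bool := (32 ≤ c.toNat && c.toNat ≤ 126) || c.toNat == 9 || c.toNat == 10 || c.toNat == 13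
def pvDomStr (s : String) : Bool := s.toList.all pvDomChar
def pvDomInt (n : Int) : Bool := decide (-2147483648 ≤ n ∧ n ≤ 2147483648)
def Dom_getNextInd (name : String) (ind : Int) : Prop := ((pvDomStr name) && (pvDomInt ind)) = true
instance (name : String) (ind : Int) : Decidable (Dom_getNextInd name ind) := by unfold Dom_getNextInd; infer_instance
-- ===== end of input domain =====

-- B replaces A's two directional while-scans with one pass collecting the non-'A' positions
-- and a closed-form modular minimum per direction (objective: alternative algorithm, same cost).

-- ===== PORT A =====

-- name[i % len(name)] == 'A'  (the loop condition of both of A's while-loops)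
def pvIsA (chars : List Char) (i : Int) : Bool :=
  PySem.List.pyGet? chars (PySem.Int.mod i (chars.length : Int)) == some 'A'

-- 'd += 1 while f d' loop, fuel-bounded (Python diverges where the fuel runs out; Pre_ excludes that)
def pvWhileInc (f : Int → Bool) (d : Int) : Nat → Int
  | 0 => d
  | fuel + 1 => if f d then pvWhileInc f (d + 1) fuel else d

def getNextInd (name : String) (ind : Int) : Int :=
  let chars := name.toList
  let right := pvWhileInc (fun r => pvIsA chars (ind + r)) 1 chars.length
  let left := pvWhileInc (fun l => pvIsA chars (ind - l)) 1 chars.length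
  if left < right then PySem.Int.mod (ind - left) (chars.length : Int)
  else PySem.Int.mod (ind + right) (chars.length : Int)

-- ===== PORT B =====

-- [i for i, c in enumerate(name) if c != 'A']
def pvPositions (chars : List Char) : List Int :=
  (PySem.List.enumerate chars 0).filterMap (fun p => if p.2 == 'A' then none else some p.1)

-- min(xs); xs is nonempty under Pre_ (Python raises ValueError on an empty generator)
def pvMinD (xs : List Int) : Int := (PySem.List.min? xs (fun x => x)).getD 0

def getNextInd_alt (name : String) (ind : Int) : Int :=
  let chars := name.toList
  let n : Int := chars.length
  let pos := pvPositions chars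
  let right := pvMinD (pos.map (fun p => PySem.Int.mod (p - ind - 1) n + 1))
  let left := pvMinD (pos.map (fun p => PySem.Int.mod (ind - p - 1) n + 1))
  if left < right then PySem.Int.mod (ind - left) n
  else PySem.Int.mod (ind + right) n

-- ===== PRECONDITION & SPEC =====
-- Pre_ excludes exactly the inputs where Python A returns no value: the empty string
-- (ZeroDivisionError from % 0) and all-'A' strings (A's first while-loop diverges).
def Pre_getNextInd (name : String) (ind : Int) : Prop :=
  name.toList ≠ [] ∧ name.toList.any (fun c => c != 'A') = true
instance (name : String) (ind : Int) : Decidable (Pre_getNextInd name ind) := by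
  unfold Pre_getNextInd; infer_instance

def pvWitness_getNextInd : String × Int := ("AAB", 0)

def Spec_getNextInd (name : String) (ind : Int) (out : Int) : Prop := out = getNextInd_alt name ind
instance (name : String) (ind : Int) (out : Int) : Decidable (Spec_getNextInd name ind out) := by
  unfold Spec_getNextInd; infer_instance

-- ===== CLAIM (what is proved, stated in full; the proofs are below) =====
def Claim_equal_getNextInd : Prop := ∀ (name : String) (ind : Int), Dom_getNextInd name ind → Pre_getNextInd name ind → Spec_getNextInd name ind (getNextInd name ind)

-- ===== LEMMAS AND PROOFS =====

-- A's while loop returns the least d' ≥ d with f d' = false, provided one exists within the fuel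
theorem pvWhileInc_spec (f : Int → Bool) :
    ∀ (fuel : Nat) (d : Int), (∃ e, d ≤ e ∧ e < d + fuel + 1 ∧ f e = false) →
      d ≤ pvWhileInc f d fuel ∧ f (pvWhileInc f d fuel) = false ∧
        ∀ e, d ≤ e → e < pvWhileInc f d fuel → f e = true := by
  intro fuel
  induction fuel with
  | zero =>
    intro d ⟨e, h1, h2, h3⟩
    have : e = d := by omega
    subst this
    simp [pvWhileInc, h3]
    omega
  | succ fuel ih =>
    intro d ⟨e, h1, h2, h3⟩
    by_cases hd : f d = true
    · have hne : e ≠ d := by intro h; rw [h] at h3; simp [h3] at hd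
      obtain ⟨ih1, ih2, ih3⟩ := ih (d + 1) ⟨e, by omega, by omega, h3⟩
      refine ⟨?_, ?_, ?_⟩
      · simp [pvWhileInc, hd]; omega
      · simpa [pvWhileInc, hd] using ih2
      · intro e' he1 he2
        simp only [pvWhileInc, hd, if_true] at he2
        rcases eq_or_lt_of_le he1 with h | h
        · rw [← h]; exact hd
        · exact ih3 e' (by omega) (by simpa [pvWhileInc, hd] using he2)
    · simp at hd
      have hred : pvWhileInc f d (fuel + 1) = d := by simp [pvWhileInc, hd]
      rw [hred]
      exact ⟨le_refl d, hd, fun e' he1 he2 => absurd he2 (by omega)⟩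

-- PySem.Int.mod respects congruence mod a positive modulus
theorem pvMod_congr {a b n : Int} (hn : 0 < n) (h : a % n = b % n) :
    PySem.Int.mod a n = PySem.Int.mod b n := by
  rw [PySem.Int.mod_eq_emod_of_pos hn, PySem.Int.mod_eq_emod_of_pos hn, h]

-- A's probe at an in-range nonnegative index reads that character directly
theorem pvIsA_of_lt (chars : List Char) (k : Nat) (hk : k < chars.length) :
    pvIsA chars (k : Int) = (chars[k] == 'A') := by
  unfold pvIsA
  have hmod : PySem.Int.mod (k : Int) (chars.length : Int) = (k : Int) := by
    rw [PySem.Int.mod_eq_emod_of_pos (by exact_mod_cast Nat.lt_of_le_of_lt (Nat.zero_le k) hk)]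
    exact Int.emod_eq_of_lt (by positivity) (by exact_mod_cast hk)
  rw [hmod, PySem.List.pyGet?_natCast, List.getElem?_eq_getElem hk]
  simp

-- membership in B's position list
theorem pvMem_positions (chars : List Char) (q : Int) :
    q ∈ pvPositions chars ↔ ∃ (k : Nat) (h : k < chars.length), q = (k : Int) ∧ chars[k] ≠ 'A' := by
  unfold pvPositions
  simp only [List.mem_filterMap, PySem.List.mem_enumerate_iff]
  constructor
  · rintro ⟨⟨i, c⟩, ⟨k, hk, hp⟩, hif⟩
    obtain ⟨h1, h2⟩ := Prod.mk.injEq .. ▸ hp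
    by_cases hc : c = 'A'
    · simp [hc] at hif
    · refine ⟨k, hk, ?_, ?_⟩
      · simp [hc] at hif; omega
      · rw [h2] at hc; exact hc
  · rintro ⟨k, hk, hq, hA⟩
    exact ⟨((k : Int), chars[k]), ⟨k, hk, by simp⟩, by simp [hA, hq]⟩

-- the distance list in direction s (s = 1: right, s = -1: left) contains exactly the
-- distances x ∈ [1, n] at which A's probe finds a non-'A' character
theorem pvMem_dists (chars : List Char) (ind : Int) (s : Int) (hs : s = 1 ∨ s = -1) (x : Int)
    (hne : chars ≠ []) :
    x ∈ (pvPositions chars).map (fun p => PySem.Int.mod (s * (p - ind) - 1) (chars.length : Int) + 1) ↔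
      1 ≤ x ∧ x ≤ (chars.length : Int) ∧ pvIsA chars (ind + s * x) = false := by
  set n : Int := (chars.length : Int) with hndef
  have hn : 0 < n := by
    rw [hndef]; exact_mod_cast List.length_pos_iff.mpr hne
  simp only [List.mem_map]
  constructor
  · rintro ⟨p, hp, hx⟩
    obtain ⟨k, hk, hpk, hA⟩ := (pvMem_positions chars p).mp hp
    subst hpk
    set a : Int := s * ((k : Int) - ind) - 1 with hadef
    have hb1 := PySem.Int.mod_nonneg a hn
    have hb2 := PySem.Int.mod_lt a hn
    refine ⟨by omega, by omega, ?_⟩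
    have hcong : pvIsA chars (ind + s * x) = pvIsA chars (k : Int) := by
      unfold pvIsA
      rw [pvMod_congr hn (a := ind + s * x) (b := (k : Int)) ?_]
      · rw [← hx, PySem.Int.mod_eq_emod_of_pos hn]
        have hsplit : ind + s * (a % n + 1) = (k : Int) + (-(s * (a / n))) * n := by
          have hd : a % n = a - n * (a / n) := by
            have := Int.ediv_add_emod a n; omega
          rw [hd, hadef]
          rcases hs with h | h <;> (subst h; ring)
        rw [hsplit, Int.add_mul_emod_self_right]
    rw [hcong, pvIsA_of_lt chars k hk]
    simp [hA]
  · rintro ⟨h1, h2, h3⟩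
    have hb1 := PySem.Int.mod_nonneg (ind + s * x) hn
    have hb2 := PySem.Int.mod_lt (ind + s * x) hn
    obtain ⟨k, hpk⟩ : ∃ k : Nat, PySem.Int.mod (ind + s * x) n = (k : Int) :=
      ⟨(PySem.Int.mod (ind + s * x) n).toNat, by omega⟩
    have hkn : (k : Int) < n := by omega
    have hk : k < chars.length := by rw [hndef] at hkn; exact_mod_cast hkn
    have hmodp : (ind + s * x) % n = (k : Int) := by
      rw [← PySem.Int.mod_eq_emod_of_pos hn]; exact hpk
    have hcong : pvIsA chars (ind + s * x) = pvIsA chars (k : Int) := by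
      unfold pvIsA
      have hm2 : PySem.Int.mod ((k : Int)) n = (k : Int) := by
        rw [PySem.Int.mod_eq_emod_of_pos hn]
        exact Int.emod_eq_of_lt (by positivity) hkn
      rw [hpk, hm2]
    have hA : chars[k] ≠ 'A' := by
      intro h
      rw [hcong, pvIsA_of_lt chars k hk] at h3
      simp [h] at h3
    refine ⟨(k : Int), (pvMem_positions chars (k : Int)).mpr ⟨k, hk, rfl, hA⟩, ?_⟩
    have hmodx : PySem.Int.mod (s * ((k : Int) - ind) - 1) n = x - 1 := by
      rw [pvMod_congr hn (a := s * ((k : Int) - ind) - 1) (b := x - 1) ?_]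
      · rw [PySem.Int.mod_eq_emod_of_pos hn]
        exact Int.emod_eq_of_lt (by omega) (by omega)
      · have hd : (k : Int) = (ind + s * x) - n * ((ind + s * x) / n) := by
          have := Int.ediv_add_emod (ind + s * x) n; omega
        have hsplit : s * ((k : Int) - ind) - 1 = (x - 1) + (-(s * ((ind + s * x) / n))) * n := by
          rw [hd]
          rcases hs with h | h <;> (subst h; ring)
        rw [hsplit, Int.add_mul_emod_self_right]
    rw [hmodx]; ring

-- B's modular minimum in direction s equals A's while-loop result in that direction
theorem pvMin_eq_while (chars : List Char) (ind : Int) (s : Int) (hs : s = 1 ∨ s = -1)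
    (hne : chars ≠ []) (hA : ∃ c ∈ chars, c ≠ 'A') :
    pvMinD ((pvPositions chars).map (fun p => PySem.Int.mod (s * (p - ind) - 1) (chars.length : Int) + 1)) =
      pvWhileInc (fun r => pvIsA chars (ind + s * r)) 1 chars.length := by
  set xs := (pvPositions chars).map (fun p => PySem.Int.mod (s * (p - ind) - 1) (chars.length : Int) + 1) with hxs
  have hposne : pvPositions chars ≠ [] := by
    obtain ⟨c, hc, hcA⟩ := hA
    obtain ⟨k, hk, hck⟩ := List.mem_iff_getElem.mp hc
    intro h
    have : (k : Int) ∈ pvPositions chars :=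
      (pvMem_positions chars (k : Int)).mpr ⟨k, hk, rfl, by rw [hck]; exact hcA⟩
    rw [h] at this; exact absurd this (List.not_mem_nil)
  have hxsne : xs ≠ [] := by
    rw [hxs]; intro h; exact hposne (List.map_eq_nil_iff.mp h)
  obtain ⟨m, hm⟩ : ∃ m, PySem.List.min? xs (fun x => x) = some m := by
    cases h : PySem.List.min? xs (fun x => x) with
    | none => exact absurd ((PySem.List.min?_eq_none_iff _ _).mp h) hxsne
    | some m => exact ⟨m, rfl⟩
  have hmmem := (pvMem_dists chars ind s hs m hne).mp (PySem.List.min?_mem hm)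
  have hmmin : ∀ y ∈ xs, m ≤ y := fun y hy => PySem.List.min?_isMin hm y hy
  obtain ⟨hw1, hw2, hw3⟩ := pvWhileInc_spec (fun r => pvIsA chars (ind + s * r)) chars.length 1
    ⟨m, hmmem.1, by omega, hmmem.2.2⟩
  set R := pvWhileInc (fun r => pvIsA chars (ind + s * r)) 1 chars.length with hR
  have hRm : R ≤ m := by
    by_contra h
    have := hw3 m hmmem.1 (by omega)
    rw [hmmem.2.2] at this; exact absurd this (by simp)
  have hmR : m ≤ R := hmmin R ((pvMem_dists chars ind s hs R hne).mpr ⟨hw1, by omega, hw2⟩)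
  have : m = R := le_antisymm hmR hRm
  simp [pvMinD, hm, this]

-- ===== VERDICT (by name: the statement is the Claim_ definition above) =====
theorem getNextInd_spec : Claim_equal_getNextInd := by
  intro name ind _ hpre
  obtain ⟨hne, hA'⟩ := hpre
  have hA : ∃ c ∈ name.toList, c ≠ 'A' := by
    obtain ⟨c, hc, hcne⟩ := List.any_eq_true.mp hA'
    exact ⟨c, hc, bne_iff_ne.mp hcne⟩
  simp only [Spec_getNextInd, getNextInd, getNextInd_alt]
  have hr := pvMin_eq_while name.toList ind 1 (Or.inl rfl) hne hA
  have hl := pvMin_eq_while name.toList ind (-1) (Or.inr rfl) hne hA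
  have e1 : (fun p : Int => PySem.Int.mod (p - ind - 1) (name.toList.length : Int) + 1) =
      (fun p : Int => PySem.Int.mod (1 * (p - ind) - 1) (name.toList.length : Int) + 1) := by
    funext p; congr 2; ring
  have e2 : (fun p : Int => PySem.Int.mod (ind - p - 1) (name.toList.length : Int) + 1) =
      (fun p : Int => PySem.Int.mod (-1 * (p - ind) - 1) (name.toList.length : Int) + 1) := by
    funext p; congr 2; ring
  have e3 : (fun r : Int => pvIsA name.toList (ind + r)) =
      (fun r : Int => pvIsA name.toList (ind + 1 * r)) := by
    funext r; congr 1; ring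
  have e4 : (fun l : Int => pvIsA name.toList (ind - l)) =
      (fun l : Int => pvIsA name.toList (ind + -1 * l)) := by
    funext l; congr 1; ring
  rw [e1, e2, hr, hl, e3, e4]
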